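-- pv_equiv track=rewrite | github.com/Sebastian081296/betaversionlaufchallenge | modules/nutzer/Backup/lotterie.py | get_duplicate_name_index_list
-- ===== SOURCE A (Python) =====
-- def get_duplicate_name_index_list(teilnehmer):
--     names = [t.get("name","").strip().lower() for t in teilnehmer]
--     seen = {}
--     index_set = set()
--     for idx, n in enumerate(names):
--         if n == "" or n in seen:
--             index_set.add(idx)
--         seen[n] = seen.get(n, 0)+1
--     for name, count in seen.items():
--         if count > 1:
--             matches = [i for i,x in enumerate(names) if x == name]
--             index_set.update(matches)
--     return sorted(list(index_set))
-- ===== SOURCE B (Python) =====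
-- def get_duplicate_name_index_list(teilnehmer):
--     names = [t.get("name", "").strip().lower() for t in teilnehmer]
--     counts = {}
--     for n in names:
--         counts[n] = counts.get(n, 0) + 1
--     return [i for i, n in enumerate(names) if n == "" or counts[n] > 1]
-- ===== Notes on version B (the rewrite author's own statement) =====
-- stated objective: simpler
-- what changed: Replaces A's seen-dict/index-set double pass (with a whole-list re-scan per duplicated name) and final sort by one frequency-table pass followed by a single filtering pass over enumerate, which yields the ascending duplicate-free list directly.
import Mathlib
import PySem

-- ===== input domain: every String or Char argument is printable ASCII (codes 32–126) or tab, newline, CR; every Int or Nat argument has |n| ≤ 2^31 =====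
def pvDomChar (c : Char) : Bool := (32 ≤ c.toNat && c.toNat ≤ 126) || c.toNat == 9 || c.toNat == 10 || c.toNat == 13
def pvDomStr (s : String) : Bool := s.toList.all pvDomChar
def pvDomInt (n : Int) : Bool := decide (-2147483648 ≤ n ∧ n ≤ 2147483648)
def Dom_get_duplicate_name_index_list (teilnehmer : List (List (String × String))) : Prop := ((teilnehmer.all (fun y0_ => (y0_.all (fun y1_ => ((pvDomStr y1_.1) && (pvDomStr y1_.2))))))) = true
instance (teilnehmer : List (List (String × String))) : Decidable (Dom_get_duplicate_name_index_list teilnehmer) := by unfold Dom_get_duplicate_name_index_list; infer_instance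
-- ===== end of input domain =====

-- B replaces A's two-pass seen-dict/index-set construction (with a whole-list re-scan per
-- duplicated name) and final sort by one frequency table plus a single filtering pass; simpler.


-- ===== PORT A =====
-- t.get("name","").strip().lower()  (shared normalization helper, identical in both Pythons)
def pvNorm (t : List (String × String)) : String :=
  PySem.Str.lower (PySem.Str.strip (PySem.Dict.getD (PySem.Dict.mk t) "name" ""))

-- the body of A's first loop (seen, index_set as one state pair)
def pvStepA (st : PySem.Dict String Int × PySem.Set Int) (p : Int × String) :
    PySem.Dict String Int × PySem.Set Int :=
  (st.1.insert p.2 (st.1.getD p.2 0 + 1),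
   if p.2 = "" ∨ st.1.contains p.2 then PySem.Set.add st.2 p.1 else st.2)

def get_duplicate_name_index_list (teilnehmer : List (List (String × String))) : List Int :=
  let names := teilnehmer.map pvNorm
  let st := (PySem.List.enumerate names).foldl pvStepA (PySem.Dict.empty, PySem.Set.empty)
  let iset := st.1.items.foldl
    (fun (s : PySem.Set Int) kc =>
      if kc.2 > 1 then
        PySem.Set.update s (((PySem.List.enumerate names).filter (fun q => q.2 == kc.1)).map (·.1))
      else s)
    st.2
  PySem.List.sorted iset (fun x => x) false

-- ===== PORT B =====
def get_duplicate_name_index_list_alt (teilnehmer : List (List (String × String))) : List Int :=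
  let names := teilnehmer.map pvNorm
  let counts := names.foldl (fun (d : PySem.Dict String Int) n => d.insert n (d.getD n 0 + 1))
    PySem.Dict.empty
  ((PySem.List.enumerate names).filter
    (fun p => p.2 == "" || decide (1 < counts.getD p.2 0))).map (·.1)

-- ===== PRECONDITION & SPEC =====
def Spec_get_duplicate_name_index_list (teilnehmer : List (List (String × String))) (out : List Int) : Prop := out = get_duplicate_name_index_list_alt teilnehmer
instance (teilnehmer : List (List (String × String))) (out : List Int) : Decidable (Spec_get_duplicate_name_index_list teilnehmer out) := by unfold Spec_get_duplicate_name_index_list; infer_instance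

-- ===== CLAIM (what is proved, stated in full; the proofs are below) =====
def Claim_equal_get_duplicate_name_index_list : Prop := ∀ (teilnehmer : List (List (String × String))), Dom_get_duplicate_name_index_list teilnehmer → Spec_get_duplicate_name_index_list teilnehmer (get_duplicate_name_index_list teilnehmer)

-- ===== LEMMAS AND PROOFS =====

-- first component of A's first loop is the plain counting fold
theorem fst_foldl_pvStepA (l : List (Int × String)) (d : PySem.Dict String Int)
    (s : PySem.Set Int) :
    (l.foldl pvStepA (d, s)).1
      = l.foldl (fun d p => d.insert p.2 (d.getD p.2 0 + 1)) d := by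
  induction l generalizing d s with
  | nil => rfl
  | cons p l ih => simp [List.foldl, pvStepA, ih]

-- membership in the index set built by A's first loop
theorem mem_snd_foldl_pvStepA (rest : List String) (k : Nat) (pref : List String)
    (s : PySem.Set Int) (x : Int) :
    (x ∈ ((PySem.List.enumerate rest (k : Int)).foldl pvStepA
        (pref.foldl (fun d n => d.insert n (d.getD n 0 + 1)) PySem.Dict.empty, s)).2)
      ↔ x ∈ s ∨ ∃ j : Nat, ∃ h : j < rest.length,
          x = ((k + j : Nat) : Int) ∧ (rest[j] = "" ∨ rest[j] ∈ pref ++ rest.take j) := by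
  induction rest generalizing k pref s with
  | nil => simp [PySem.List.enumerate_nil]
  | cons r rest ih =>
    rw [PySem.List.enumerate_cons, List.foldl_cons]
    have hstep : pvStepA
        (pref.foldl (fun d n => d.insert n (d.getD n 0 + 1)) PySem.Dict.empty, s) ((k : Int), r)
        = ((pref ++ [r]).foldl (fun d n => d.insert n (d.getD n 0 + 1)) PySem.Dict.empty,
           if r = "" ∨ r ∈ pref then PySem.Set.add s (k : Int) else s) := by
      simp only [pvStepA, List.foldl_append, List.foldl_cons, List.foldl_nil,
        PySem.Dict.contains_eq_decide_mem_keys, PySem.Dict.keys_foldl_insert,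
        PySem.Dict.keys_empty]
      simp [PySem.Set.mem_update]
    rw [hstep]
    have hk : ((k : Int) + 1) = ((k + 1 : Nat) : Int) := by push_cast; ring
    rw [hk, ih (k + 1) (pref ++ [r])]
    constructor
    · rintro (hmem | ⟨j, hj, hx, hc⟩)
      · by_cases hc : r = "" ∨ r ∈ pref
        · rw [if_pos hc, PySem.Set.mem_add] at hmem
          rcases hmem with hmem | rfl
          · exact Or.inl hmem
          · exact Or.inr ⟨0, by simp, by simp, by simpa using hc⟩
        · rw [if_neg hc] at hmem; exact Or.inl hmem
      · refine Or.inr ⟨j + 1, by simpa using hj, by push_cast at hx ⊢; omega, ?_⟩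
        simpa [List.append_assoc] using hc
    · rintro (hmem | ⟨j, hj, hx, hc⟩)
      · left
        by_cases hcnd : r = "" ∨ r ∈ pref
        · rw [if_pos hcnd, PySem.Set.mem_add]; exact Or.inl hmem
        · rw [if_neg hcnd]; exact hmem
      · match j with
        | 0 =>
          left
          simp only [List.getElem_cons_zero, List.take_zero, List.append_nil] at hc
          rw [if_pos hc, PySem.Set.mem_add]
          right; simpa using hx
        | j + 1 =>
          refine Or.inr ⟨j, by simpa using hj, by push_cast at hx ⊢; omega, ?_⟩
          simpa [List.append_assoc] using hc

-- membership in the result of A's second loop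
theorem mem_foldl_update_if (l : List (String × Int)) (s : PySem.Set Int)
    (g : String × Int → List Int) (x : Int) :
    (x ∈ l.foldl (fun s kc => if kc.2 > 1 then PySem.Set.update s (g kc) else s) s)
      ↔ x ∈ s ∨ ∃ kc ∈ l, kc.2 > 1 ∧ x ∈ g kc := by
  induction l generalizing s with
  | nil => simp
  | cons kc l ih =>
    by_cases h : kc.2 > 1 <;>
      simp [List.foldl, h, ih, PySem.Set.mem_update, or_assoc]

-- the two loops preserve Nodup of the index set
theorem nodup_snd_foldl_pvStepA (l : List (Int × String))
    (d : PySem.Dict String Int) (s : PySem.Set Int) (hs : s.Nodup) :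
    (l.foldl pvStepA (d, s)).2.Nodup := by
  induction l generalizing d s with
  | nil => exact hs
  | cons p l ih =>
    refine ih _ _ ?_
    by_cases h : p.2 = "" ∨ (PySem.Dict.contains d p.2) <;>
      simp [h, PySem.Set.nodup_add, hs]

theorem nodup_foldl_update_if (l : List (String × Int)) (s : PySem.Set Int)
    (g : String × Int → List Int) (hs : s.Nodup) :
    (l.foldl (fun s kc => if kc.2 > 1 then PySem.Set.update s (g kc) else s) s).Nodup := by
  induction l generalizing s with
  | nil => exact hs
  | cons kc l ih =>
    by_cases h : kc.2 > 1 <;> simp [List.foldl, h] <;>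
      exact ih _ (by first | exact PySem.Set.nodup_update _ _ hs | exact hs)

-- a name seen earlier occurs at least twice in the whole list
theorem count_gt_one_of_mem_take (names : List String) (j : Nat) (h : j < names.length)
    (hm : names[j] ∈ names.take j) : 1 < names.count names[j] := by
  have h2 : names[j] ∈ names.drop j := by
    have h0 : 0 < (names.drop j).length := by simp; omega
    have he : (names.drop j)[0] = names[j] := by simp
    exact he ▸ List.getElem_mem h0
  have h1 : 0 < (names.take j).count names[j] := List.count_pos_iff.mpr hm
  have h3 : 0 < (names.drop j).count names[j] := List.count_pos_iff.mpr h2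
  have hta := List.take_append_drop j names
  calc 1 < (names.take j).count names[j] + (names.drop j).count names[j] := by omega
    _ = (names.take j ++ names.drop j).count names[j] := (List.count_append ..).symm
    _ = names.count names[j] := by rw [hta]

-- the heart: A's sorted set equals B's filtered enumeration, for any name list
theorem pv_main (names : List String) :
    PySem.List.sorted
      (((((PySem.List.enumerate names).foldl pvStepA
          (PySem.Dict.empty, PySem.Set.empty)).1).items).foldl
        (fun (s : PySem.Set Int) kc =>
          if kc.2 > 1 then
            PySem.Set.update s
              (((PySem.List.enumerate names).filter (fun q => q.2 == kc.1)).map (·.1))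
          else s)
        (((PySem.List.enumerate names).foldl pvStepA
          (PySem.Dict.empty, PySem.Set.empty)).2))
      (fun x => x) false
    = ((PySem.List.enumerate names).filter
        (fun p => p.2 == "" ||
          decide (1 < (names.foldl (fun (d : PySem.Dict String Int) n =>
            d.insert n (d.getD n 0 + 1)) PySem.Dict.empty).getD p.2 0))).map (·.1) := by
  have hcounts : (names.foldl (fun (d : PySem.Dict String Int) n =>
      d.insert n (d.getD n 0 + 1)) PySem.Dict.empty) = PySem.Dict.counter names :=
    PySem.Dict.foldl_insert_getD_add_one_eq_counter names
  have hseen : ((PySem.List.enumerate names).foldl pvStepA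
      (PySem.Dict.empty, PySem.Set.empty)).1 = PySem.Dict.counter names := by
    rw [fst_foldl_pvStepA, ← hcounts]
    conv_rhs => rw [← PySem.List.map_snd_enumerate names 0]
    rw [List.foldl_map]
  have hA : ∀ x : Int,
      (x ∈ ((((PySem.List.enumerate names).foldl pvStepA
          (PySem.Dict.empty, PySem.Set.empty)).1).items).foldl
        (fun (s : PySem.Set Int) kc =>
          if kc.2 > 1 then
            PySem.Set.update s
              (((PySem.List.enumerate names).filter (fun q => q.2 == kc.1)).map (·.1))
          else s)
        (((PySem.List.enumerate names).foldl pvStepA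
          (PySem.Dict.empty, PySem.Set.empty)).2))
      ↔ ∃ j : Nat, ∃ _ : j < names.length,
          x = (j : Int) ∧ (names[j] = "" ∨ 1 < names.count names[j]) := by
    intro x
    rw [mem_foldl_update_if, hseen, PySem.Dict.items_counter]
    have hs1 : (x ∈ ((PySem.List.enumerate names).foldl pvStepA
        (PySem.Dict.empty, PySem.Set.empty)).2)
        ↔ ∃ j : Nat, ∃ _ : j < names.length,
            x = (j : Int) ∧ (names[j] = "" ∨ names[j] ∈ names.take j) := by
      simpa using mem_snd_foldl_pvStepA names 0 [] PySem.Set.empty x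
    rw [hs1]
    constructor
    · rintro (⟨j, hj, rfl, hc⟩ | ⟨kc, hkc, hgt, hx⟩)
      · refine ⟨j, hj, rfl, ?_⟩
        rcases hc with h | h
        · exact Or.inl h
        · exact Or.inr (count_gt_one_of_mem_take names j hj h)
      · rcases List.mem_map.mp hkc with ⟨name, hn, rfl⟩
        rcases List.mem_map.mp hx with ⟨q, hq, rfl⟩
        rcases List.mem_filter.mp hq with ⟨hqe, hq2⟩
        rcases (PySem.List.mem_enumerate_iff _ _ _).mp hqe with ⟨j, hj, rfl⟩
        refine ⟨j, hj, by simp, Or.inr ?_⟩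
        have hname : names[j] = name := by simpa using hq2
        rw [hname]
        simp only [gt_iff_lt] at hgt
        exact_mod_cast hgt
    · rintro ⟨j, hj, rfl, hc⟩
      rcases hc with h | h
      · exact Or.inl ⟨j, hj, rfl, Or.inl h⟩
      · refine Or.inr ⟨(names[j], (names.count names[j] : Int)), ?_, by simp only [gt_iff_lt]; exact_mod_cast h, ?_⟩
        · exact List.mem_map.mpr
            ⟨names[j], (PySem.Set.mem_ofList _ _).mpr (List.getElem_mem hj), rfl⟩
        · exact List.mem_map.mpr
            ⟨((j : Int), names[j]),
             List.mem_filter.mpr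
               ⟨(PySem.List.mem_enumerate_iff _ _ _).mpr ⟨j, hj, by simp⟩, by simp⟩, rfl⟩
  have hB : ∀ x : Int,
      (x ∈ ((PySem.List.enumerate names).filter
        (fun p => p.2 == "" ||
          decide (1 < (names.foldl (fun (d : PySem.Dict String Int) n =>
            d.insert n (d.getD n 0 + 1)) PySem.Dict.empty).getD p.2 0))).map (·.1))
      ↔ ∃ j : Nat, ∃ _ : j < names.length,
          x = (j : Int) ∧ (names[j] = "" ∨ 1 < names.count names[j]) := by
    intro x
    rw [hcounts]
    constructor
    · rintro hx
      rcases List.mem_map.mp hx with ⟨q, hq, rfl⟩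
      rcases List.mem_filter.mp hq with ⟨hqe, hcond⟩
      rcases (PySem.List.mem_enumerate_iff _ _ _).mp hqe with ⟨j, hj, rfl⟩
      refine ⟨j, hj, by simp, ?_⟩
      simpa [PySem.Dict.getD_counter] using hcond
    · rintro ⟨j, hj, rfl, hc⟩
      refine List.mem_map.mpr
        ⟨((j : Int), names[j]),
         List.mem_filter.mpr
           ⟨(PySem.List.mem_enumerate_iff _ _ _).mpr ⟨j, hj, by simp⟩, ?_⟩, rfl⟩
      simpa [PySem.Dict.getD_counter] using hc
  have hpair : (((PySem.List.enumerate names).filter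
      (fun p => p.2 == "" ||
        decide (1 < (names.foldl (fun (d : PySem.Dict String Int) n =>
          d.insert n (d.getD n 0 + 1)) PySem.Dict.empty).getD p.2 0))).map (·.1)).Pairwise
      (fun a b => a < b) :=
    (List.pairwise_map).mpr ((PySem.List.pairwise_lt_enumerate names 0).filter _)
  have hnodupB := hpair.imp fun h => ne_of_lt h
  have hnodupA : (((((PySem.List.enumerate names).foldl pvStepA
      (PySem.Dict.empty, PySem.Set.empty)).1).items).foldl
        (fun (s : PySem.Set Int) kc =>
          if kc.2 > 1 then
            PySem.Set.update s
              (((PySem.List.enumerate names).filter (fun q => q.2 == kc.1)).map (·.1))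
          else s)
        (((PySem.List.enumerate names).foldl pvStepA
          (PySem.Dict.empty, PySem.Set.empty)).2)).Nodup :=
    nodup_foldl_update_if _ _ _
      (nodup_snd_foldl_pvStepA (PySem.List.enumerate names) PySem.Dict.empty
        PySem.Set.empty List.nodup_nil)
  have hperm := (List.perm_ext_iff_of_nodup hnodupB hnodupA).mpr
    (fun x => (hB x).trans (hA x).symm)
  exact PySem.List.sorted_eq_of_perm_of_pairwise_lt _ _ _ hperm hpair

-- ===== VERDICT (by name: the statement is the Claim_ definition above) =====
theorem get_duplicate_name_index_list_spec : Claim_equal_get_duplicate_name_index_list := by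
  intro teilnehmer _
  unfold Spec_get_duplicate_name_index_list
  show get_duplicate_name_index_list _ = _
  unfold get_duplicate_name_index_list get_duplicate_name_index_list_alt
  dsimp only
  exact pv_main (teilnehmer.map pvNorm)
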